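-- pv_equiv track=rewrite | github.com/edwbit/edutools | parsing/wayground_question_parser.py | split_into_blocks
-- ===== SOURCE A (Python) =====
-- def split_into_blocks(lines):
--     """
--     Split lines into question blocks separated by empty lines.
--
--     Args:
--         lines: List of strings representing lines from the file
--
--     Returns:
--         list: List of blocks, where each block is a list of lines
--     """
--     blocks = []
--     current_block = []
--
--     for line in lines:
--         stripped_line = line.strip()
--
--         if stripped_line:  # Non-empty line
--             # Check if this is a new question starting (and we have content in current block)
--             if (current_block and
--                 not stripped_line[0] in 'ABCDabc' and
--                 not stripped_line.lower().startswith('answer:') and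
--                 has_answer_declaration(current_block)):
--                 # This looks like a new question starting, and current block is complete
--                 blocks.append(current_block)
--                 current_block = []
--
--             current_block.append(line)
--
--         else:  # Empty line - potential block separator
--             if current_block and has_answer_declaration(current_block):
--                 blocks.append(current_block)
--                 current_block = []
--
--     # Add the last block if it has content
--     if current_block:
--         blocks.append(current_block)
--
--     return blocks
--
-- def has_answer_declaration(block):
--     """Check if a block contains an ANSWER declaration"""
--     return any(line.strip().lower().startswith('answer:') for line in block)
-- ===== SOURCE B (Python) =====
-- def split_into_blocks(lines):
--     """Split lines into question blocks separated by empty lines.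
--
--     Different decomposition: instead of one fold over lines with mutable
--     block state, repeatedly extract one complete block (an index walk that
--     carries a running 'has answer declaration' flag), then continue after it.
--     One pass overall, no rescans of the current block."""
--     n = len(lines)
--
--     def take_block(start):
--         # consume one block starting at index `start`; return (block, next index)
--         block = []
--         have_ans = False
--         i = start
--         while i < n:
--             s = lines[i].strip()
--             if not s:
--                 if have_ans:
--                     return block, i + 1
--                 i += 1
--             elif have_ans and not (s[0] in 'ABCDabc'
--                                    or s.lower().startswith('answer:')):
--                 return block, i
--             else:
--                 block.append(lines[i])
--                 have_ans = have_ans or s.lower().startswith('answer:')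
--                 i += 1
--         return block, n
--
--     blocks = []
--     i = 0
--     while i < n:
--         block, i = take_block(i)
--         if block:
--             blocks.append(block)
--     return blocks
-- ===== Notes on version B (the rewrite author's own statement) =====
-- stated objective: faster
-- what changed: Replaces A's single fold that rescans the whole current block (has_answer_declaration) on every line by a block-extraction decomposition: a helper walks forward once carrying a running has-answer flag and returns one complete block plus the resume index, and the driver repeatedly calls it; each line is visited once.
import Mathlib
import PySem

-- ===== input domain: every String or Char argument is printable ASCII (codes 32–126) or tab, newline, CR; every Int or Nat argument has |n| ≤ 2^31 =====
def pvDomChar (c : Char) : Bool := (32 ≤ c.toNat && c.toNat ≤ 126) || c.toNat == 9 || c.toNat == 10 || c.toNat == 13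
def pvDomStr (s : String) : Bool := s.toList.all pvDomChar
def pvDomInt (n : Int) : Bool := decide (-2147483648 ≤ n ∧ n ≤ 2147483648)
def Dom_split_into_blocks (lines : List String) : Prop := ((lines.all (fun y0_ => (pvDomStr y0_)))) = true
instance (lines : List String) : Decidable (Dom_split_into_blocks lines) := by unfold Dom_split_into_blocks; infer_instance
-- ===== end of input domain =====

-- B extracts one complete block at a time with a running has-answer flag, instead of A's single fold that rescans the current block on every line.

-- ===== PORT A =====
-- line.strip().lower().startswith('answer:')
def pvIsAns (l : String) : Bool :=
  PySem.Str.startswith (PySem.Str.lower (PySem.Str.strip l)) "answer:"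

-- has_answer_declaration: any(line.strip().lower().startswith('answer:') for line in block)
def pvHasAnsDecl (block : List String) : Bool := block.any pvIsAns

def pvStepA (st : List (List String) × List String) (line : String) :
    List (List String) × List String :=
  let (blocks, cur) := st
  let stripped := PySem.Str.strip line
  if stripped.toList ≠ [] then
    let (blocks, cur) :=
      if !cur.isEmpty &&
         !("ABCDabc".toList.contains (stripped.toList.headD ' ')) &&
         !(PySem.Str.startswith (PySem.Str.lower stripped) "answer:") &&
         pvHasAnsDecl cur
      then (blocks ++ [cur], ([] : List String))
      else (blocks, cur)
    (blocks, cur ++ [line])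
  else
    if !cur.isEmpty && pvHasAnsDecl cur then (blocks ++ [cur], []) else (blocks, cur)

def split_into_blocks (lines : List String) : List (List String) :=
  let st := lines.foldl pvStepA ([], [])
  if !st.2.isEmpty then st.1 ++ [st.2] else st.1

-- ===== PORT B =====
-- s[0] in 'ABCDabc' or s.lower().startswith('answer:')  (s = stripped line, nonempty here)
def pvIsCont (stripped : String) : Bool :=
  "ABCDabc".toList.contains (stripped.toList.headD ' ') ||
  PySem.Str.startswith (PySem.Str.lower stripped) "answer:"

-- take_block: index walk over the remaining suffix, carrying the block built so
-- far and the running have_ans flag; returns (block, remaining suffix).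
def pvTakeBlock : List String → List String → Bool → List String × List String
  | [], block, _ => (block, [])
  | line :: rest, block, haveAns =>
    let s := PySem.Str.strip line
    if s.toList = [] then
      if haveAns then (block, rest) else pvTakeBlock rest block haveAns
    else if haveAns && !(pvIsCont s) then (block, line :: rest)
    else pvTakeBlock rest (block ++ [line]) (haveAns || pvIsAns line)

theorem pvTakeBlock_len (l : List String) (block : List String) (h : Bool) :
    (pvTakeBlock l block h).2.length ≤ l.length := by
  induction l generalizing block h with
  | nil => simp [pvTakeBlock]
  | cons line rest ih =>
    simp only [pvTakeBlock]
    split_ifs <;> simp <;> exact le_trans (ih _ _) (Nat.le_succ _)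

theorem pvTakeBlock_lt (line : String) (rest : List String) (block : List String) :
    (pvTakeBlock (line :: rest) block false).2.length < (line :: rest).length := by
  simp only [pvTakeBlock]
  split_ifs <;> simp_all <;> exact pvTakeBlock_len _ _ _

-- outer loop: while lines remain, take one block; keep it if nonempty.
def pvGo : List String → List (List String)
  | [] => []
  | line :: rest =>
    let p := pvTakeBlock (line :: rest) [] false
    (if p.1 ≠ [] then [p.1] else []) ++ pvGo p.2
termination_by l => l.length
decreasing_by exact pvTakeBlock_lt line rest []

def split_into_blocks_alt (lines : List String) : List (List String) := pvGo lines

-- ===== PRECONDITION & SPEC =====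
def Spec_split_into_blocks (lines : List String) (out : List (List String)) : Prop := out = split_into_blocks_alt lines
instance (lines : List String) (out : List (List String)) : Decidable (Spec_split_into_blocks lines out) := by unfold Spec_split_into_blocks; infer_instance

-- ===== CLAIM (what is proved, stated in full; the proofs are below) =====
def Claim_equal_split_into_blocks : Prop := ∀ (lines : List String), Dom_split_into_blocks lines → Spec_split_into_blocks lines (split_into_blocks lines)

-- ===== LEMMAS AND PROOFS =====

-- Case-by-case equations for A's step function.
theorem pvStepA_empty_flush (blocks : List (List String)) (cur : List String) (line : String)
    (hs : (PySem.Str.strip line).toList = [])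
    (hc : (!cur.isEmpty && pvHasAnsDecl cur) = true) :
    pvStepA (blocks, cur) line = (blocks ++ [cur], []) := by
  simp only [pvStepA]
  rw [if_neg (not_not_intro hs), if_pos hc]

theorem pvStepA_empty_skip (blocks : List (List String)) (cur : List String) (line : String)
    (hs : (PySem.Str.strip line).toList = [])
    (hc : (!cur.isEmpty && pvHasAnsDecl cur) = false) :
    pvStepA (blocks, cur) line = (blocks, cur) := by
  simp only [pvStepA]
  rw [if_neg (not_not_intro hs),
      if_neg (show ¬_ = true by rw [hc]; exact Bool.false_ne_true)]

theorem pvStepA_flush (blocks : List (List String)) (cur : List String) (line : String)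
    (hs : (PySem.Str.strip line).toList ≠ [])
    (hc : (!cur.isEmpty &&
        !("ABCDabc".toList.contains ((PySem.Str.strip line).toList.headD ' ')) &&
        !(PySem.Str.startswith (PySem.Str.lower (PySem.Str.strip line)) "answer:") &&
        pvHasAnsDecl cur) = true) :
    pvStepA (blocks, cur) line = (blocks ++ [cur], [line]) := by
  simp only [pvStepA]
  rw [if_pos hs, if_pos hc]
  rfl

theorem pvStepA_append (blocks : List (List String)) (cur : List String) (line : String)
    (hs : (PySem.Str.strip line).toList ≠ [])
    (hc : (!cur.isEmpty &&
        !("ABCDabc".toList.contains ((PySem.Str.strip line).toList.headD ' ')) &&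
        !(PySem.Str.startswith (PySem.Str.lower (PySem.Str.strip line)) "answer:") &&
        pvHasAnsDecl cur) = false) :
    pvStepA (blocks, cur) line = (blocks, cur ++ [line]) := by
  simp only [pvStepA]
  rw [if_pos hs, if_neg (show ¬_ = true by rw [hc]; exact Bool.false_ne_true)]

-- A's fold only appends to the block list: the initial block list is a prefix.
theorem pvFoldA_prefix (l : List String) (blocks : List (List String)) (cur : List String) :
    l.foldl pvStepA (blocks, cur)
      = (blocks ++ (l.foldl pvStepA ([], cur)).1, (l.foldl pvStepA ([], cur)).2) := by
  induction l generalizing blocks cur with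
  | nil => simp
  | cons line rest ih =>
    simp only [List.foldl_cons]
    have hstep : pvStepA (blocks, cur) line
        = (blocks ++ (pvStepA ([], cur) line).1, (pvStepA ([], cur) line).2) := by
      simp only [pvStepA]
      split_ifs <;> simp
    rw [hstep, ih, ih (pvStepA ([], cur) line).1]
    simp

def pvFinish (l : List String) (cur : List String) : List (List String) :=
  let st := l.foldl pvStepA ([], cur)
  if !st.2.isEmpty then st.1 ++ [st.2] else st.1

def pvGoCont (l : List String) (cur : List String) : List (List String) :=
  let p := pvTakeBlock l cur (pvHasAnsDecl cur)
  (if p.1 ≠ [] then [p.1] else []) ++ pvGo p.2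

theorem pvGo_eq_cont (l : List String) : pvGo l = pvGoCont l [] := by
  cases l with
  | nil => simp [pvGo, pvGoCont, pvTakeBlock]
  | cons a r => simp [pvGo, pvGoCont, pvHasAnsDecl]

theorem pvHasAnsDecl_ne_nil (cur : List String) (h : pvHasAnsDecl cur = true) : cur ≠ [] := by
  intro hnil; subst hnil; simp [pvHasAnsDecl] at h

theorem pv_main (l : List String) : ∀ cur, pvFinish l cur = pvGoCont l cur := by
  induction l with
  | nil =>
    intro cur
    cases cur <;> simp [pvFinish, pvGoCont, pvTakeBlock, pvGo]
  | cons line rest ih =>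
    intro cur
    by_cases hs : (PySem.Str.strip line).toList = []
    · -- empty stripped line
      by_cases ha : pvHasAnsDecl cur = true
      · -- flush on blank separator
        have hne : cur ≠ [] := pvHasAnsDecl_ne_nil cur ha
        have hemp : cur.isEmpty = false := by simp [List.isEmpty_iff, hne]
        have hc : (!cur.isEmpty && pvHasAnsDecl cur) = true := by rw [hemp, ha]; rfl
        simp only [pvFinish, List.foldl_cons, pvStepA_empty_flush [] cur line hs hc,
          List.nil_append]
        rw [pvFoldA_prefix rest [cur] []]
        have hB : pvTakeBlock (line :: rest) cur (pvHasAnsDecl cur) = (cur, rest) := by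
          simp only [pvTakeBlock]
          rw [if_pos hs, if_pos ha]
        simp only [pvGoCont, hB]
        rw [if_pos hne, pvGo_eq_cont rest, ← ih []]
        simp only [pvFinish]
        split_ifs <;> simp
      · -- skip blank line
        have hc : (!cur.isEmpty && pvHasAnsDecl cur) = false := by
          rw [Bool.eq_false_iff.mpr ha, Bool.and_false]
        simp only [pvFinish, List.foldl_cons, pvStepA_empty_skip [] cur line hs hc]
        have hB : pvTakeBlock (line :: rest) cur (pvHasAnsDecl cur)
            = pvTakeBlock rest cur (pvHasAnsDecl cur) := by
          simp only [pvTakeBlock]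
          rw [if_pos hs, if_neg ha]
        have hGC : pvGoCont (line :: rest) cur = pvGoCont rest cur := by
          simp only [pvGoCont, hB]
        rw [hGC]
        exact ih cur
    · -- non-empty stripped line
      by_cases hflush : (pvHasAnsDecl cur && !(pvIsCont (PySem.Str.strip line))) = true
      · -- new question starts: flush
        have ha : pvHasAnsDecl cur = true := by
          cases h2 : pvHasAnsDecl cur <;> simp_all
        have hne : cur ≠ [] := pvHasAnsDecl_ne_nil cur ha
        have hemp : cur.isEmpty = false := by simp [List.isEmpty_iff, hne]
        have hcont : pvIsCont (PySem.Str.strip line) = false := by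
          cases h2 : pvIsCont (PySem.Str.strip line) <;> simp_all
        have hcont' := hcont
        simp only [pvIsCont, Bool.or_eq_false_iff] at hcont'
        have hc : (!cur.isEmpty &&
            !("ABCDabc".toList.contains ((PySem.Str.strip line).toList.headD ' ')) &&
            !(PySem.Str.startswith (PySem.Str.lower (PySem.Str.strip line)) "answer:") &&
            pvHasAnsDecl cur) = true := by
          rw [hemp, hcont'.1, hcont'.2, ha]; rfl
        simp only [pvFinish, List.foldl_cons, pvStepA_flush [] cur line hs hc,
          List.nil_append]
        rw [pvFoldA_prefix rest [cur] [line]]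
        have hBtop : pvTakeBlock (line :: rest) cur (pvHasAnsDecl cur)
            = (cur, line :: rest) := by
          simp only [pvTakeBlock]
          rw [if_neg hs, if_pos hflush]
        have h0 : pvHasAnsDecl ([] : List String) = false := rfl
        have h1 : pvHasAnsDecl [line] = (false || pvIsAns line) := by simp [pvHasAnsDecl]
        have hBnext : pvTakeBlock (line :: rest) [] (pvHasAnsDecl [])
            = pvTakeBlock rest [line] (pvHasAnsDecl [line]) := by
          rw [h0, h1]
          simp only [pvTakeBlock]
          rw [if_neg hs, if_neg (by simp), List.nil_append]
        have hGC : pvGoCont (line :: rest) [] = pvGoCont rest [line] := by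
          simp only [pvGoCont, hBnext]
        simp only [pvGoCont, hBtop]
        rw [if_pos hne, pvGo_eq_cont (line :: rest), hGC, ← ih [line]]
        simp only [pvFinish]
        split_ifs <;> simp
      · -- continuation: append to current block
        have hc : (!cur.isEmpty &&
            !("ABCDabc".toList.contains ((PySem.Str.strip line).toList.headD ' ')) &&
            !(PySem.Str.startswith (PySem.Str.lower (PySem.Str.strip line)) "answer:") &&
            pvHasAnsDecl cur) = false := by
          cases ha : pvHasAnsDecl cur with
          | false => simp only [ha, Bool.and_false]
          | true =>
            have h2 : pvIsCont (PySem.Str.strip line) = true := by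
              cases h3 : pvIsCont (PySem.Str.strip line) <;> simp_all
            simp only [pvIsCont, Bool.or_eq_true] at h2
            rcases h2 with h2 | h2 <;>
              simp only [h2, Bool.not_true, Bool.false_and, Bool.and_false]
        simp only [pvFinish, List.foldl_cons, pvStepA_append [] cur line hs hc]
        have hor : (pvHasAnsDecl cur || pvIsAns line) = pvHasAnsDecl (cur ++ [line]) := by
          simp [pvHasAnsDecl]
        have hB : pvTakeBlock (line :: rest) cur (pvHasAnsDecl cur)
            = pvTakeBlock rest (cur ++ [line]) (pvHasAnsDecl (cur ++ [line])) := by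
          simp only [pvTakeBlock]
          rw [if_neg hs, if_neg hflush, hor]
        have hGC : pvGoCont (line :: rest) cur = pvGoCont rest (cur ++ [line]) := by
          simp only [pvGoCont, hB]
        rw [hGC]
        exact ih (cur ++ [line])

-- ===== VERDICT (by name: the statement is the Claim_ definition above) =====
theorem split_into_blocks_spec : Claim_equal_split_into_blocks := by
  intro lines _
  unfold Spec_split_into_blocks split_into_blocks split_into_blocks_alt
  have h := pv_main lines []
  simp only [pvFinish] at h
  rw [pvGo_eq_cont lines, ← h]
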